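-- pv_equiv track=rewrite | github.com/ounokoya/shefi-trading-bot | libs/optimizations/zerem_ratio/runner.py | _series_combos
-- ===== SOURCE A (Python) =====
-- import itertools
-- from typing import Any, Dict, List, Optional, Tuple
--
-- def _series_combos(series_universe: List[str], k: int) -> List[Tuple[str, ...]]:
--     u = list(series_universe)
--     if not u:
--         return []
--     k = int(k)
--     if int(k) < 1:
--         k = 1
--     k = min(int(k), int(len(u)))
--     combos: List[Tuple[str, ...]] = []
--     for c in itertools.combinations(u, int(k)):
--         combos.append(tuple(c))
--     return combos
-- ===== SOURCE B (Python) =====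
-- def _series_combos(series_universe, k):
--     u = list(series_universe)
--     if not u:
--         return []
--     kk = int(k)
--     if kk < 1:
--         kk = 1
--     if kk > len(u):
--         kk = len(u)
--     out = []
--
--     def rec(start, chosen):
--         if len(chosen) == kk:
--             out.append(tuple(chosen))
--             return
--         for i in range(start, len(u)):
--             rec(i + 1, chosen + [u[i]])
--
--     rec(0, [])
--     return out
-- ===== Notes on version B (the rewrite author's own statement) =====
-- stated objective: alternative
-- what changed: Replaces the itertools.combinations generator with a hand-written recursive backtracking helper rec(start, chosen) that extends the chosen prefix by strictly increasing index and appends it once it reaches length k.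
import Mathlib
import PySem

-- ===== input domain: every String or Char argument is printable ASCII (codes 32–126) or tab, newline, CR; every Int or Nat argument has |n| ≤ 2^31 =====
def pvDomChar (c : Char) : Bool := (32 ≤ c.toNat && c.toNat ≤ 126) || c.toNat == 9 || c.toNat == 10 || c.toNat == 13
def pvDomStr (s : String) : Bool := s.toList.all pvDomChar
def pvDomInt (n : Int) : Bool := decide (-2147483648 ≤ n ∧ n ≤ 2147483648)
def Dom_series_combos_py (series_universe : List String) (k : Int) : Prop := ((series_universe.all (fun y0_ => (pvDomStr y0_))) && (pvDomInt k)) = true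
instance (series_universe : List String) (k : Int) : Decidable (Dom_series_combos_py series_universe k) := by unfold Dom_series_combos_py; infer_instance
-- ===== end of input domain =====

-- B replaces the itertools.combinations generator with a recursive backtracking
-- helper extending a chosen prefix by strictly increasing index (objective: alternative).

-- ===== PORT A =====
-- itertools.combinations(u, k) in lexicographic-by-index order, ported by hand
-- (exact: standard recursive characterisation of its emission order).
def pvCombosA : List String → Nat → List (List String)
  | _, 0 => [[]]
  | [], _ + 1 => []
  | x :: xs, n + 1 => (pvCombosA xs n).map (fun c => x :: c) ++ pvCombosA xs (n + 1)

def series_combos_py (series_universe : List String) (k : Int) : List (List String) :=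
  let u := series_universe
  if u = [] then []
  else
    let k1 : Int := if k < 1 then 1 else k
    let k2 : Int := min k1 (u.length : Int)
    pvCombosA u k2.toNat

-- ===== PORT B =====
-- rec(start, chosen): the 'for i in range(start, len(u))' loop becomes structural
-- recursion on the suffix u[start:]; the first branch is the loop iteration i=start
-- (rec(i+1, chosen+[u[i]])), the second the remaining loop iterations.
def pvRecB (kk : Nat) : List String → List String → List (List String)
  | chosen, rest =>
    if chosen.length = kk then [chosen]
    else
      match rest with
      | [] => []
      | x :: xs => pvRecB kk (chosen ++ [x]) xs ++ pvRecB kk chosen xs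

def series_combos_py_alt (series_universe : List String) (k : Int) : List (List String) :=
  let u := series_universe
  if u = [] then []
  else
    let kk : Int := if k < 1 then 1 else k
    let kk2 : Int := if kk > (u.length : Int) then (u.length : Int) else kk
    pvRecB kk2.toNat [] u

-- ===== PRECONDITION & SPEC =====
def Spec_series_combos_py (series_universe : List String) (k : Int) (out : List (List String)) : Prop := out = series_combos_py_alt series_universe k
instance (series_universe : List String) (k : Int) (out : List (List String)) : Decidable (Spec_series_combos_py series_universe k out) := by unfold Spec_series_combos_py; infer_instance

-- ===== CLAIM (what is proved, stated in full; the proofs are below) =====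
def Claim_equal_series_combos_py : Prop := ∀ (series_universe : List String) (k : Int), Dom_series_combos_py series_universe k → Spec_series_combos_py series_universe k (series_combos_py series_universe k)

-- ===== LEMMAS AND PROOFS =====

theorem pvRecB_eq (kk : Nat) (rest : List String) :
    ∀ chosen : List String, chosen.length ≤ kk →
      pvRecB kk chosen rest = (pvCombosA rest (kk - chosen.length)).map (fun c => chosen ++ c) := by
  induction rest with
  | nil =>
    intro chosen h
    by_cases hl : chosen.length = kk
    · simp [pvRecB, pvCombosA, hl]
    · have : kk - chosen.length ≠ 0 := by omega
      obtain ⟨m, hm⟩ := Nat.exists_eq_succ_of_ne_zero this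
      simp [pvRecB, pvCombosA, hl, hm]
  | cons x xs ih =>
    intro chosen h
    by_cases hl : chosen.length = kk
    · simp [pvRecB, pvCombosA, hl]
    · have hlt : chosen.length < kk := lt_of_le_of_ne h hl
      have : kk - chosen.length ≠ 0 := by omega
      obtain ⟨m, hm⟩ := Nat.exists_eq_succ_of_ne_zero this
      have h1 : (chosen ++ [x]).length ≤ kk := by simp; omega
      have h2 : kk - (chosen ++ [x]).length = m := by simp; omega
      rw [pvRecB]
      simp only [hl, if_false]
      rw [ih (chosen ++ [x]) h1, ih chosen h, hm, h2]
      simp [pvCombosA, Function.comp]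

theorem series_combos_py_spec : Claim_equal_series_combos_py := by
  intro u k _
  unfold Spec_series_combos_py series_combos_py series_combos_py_alt
  by_cases hu : u = []
  · simp [hu]
  · simp only [hu, if_false]
    have hmin : min (if k < 1 then 1 else k) (u.length : Int)
        = (if (if k < 1 then 1 else k) > (u.length : Int) then (u.length : Int) else (if k < 1 then 1 else k)) := by
      split_ifs with h1 h2 h2 <;> omega
    rw [hmin]
    rw [pvRecB_eq _ u [] (Nat.zero_le _)]
    simp
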